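-- pv_equiv track=rewrite | github.com/Manjesh80/googly | EPI/recursion/recursion_works.py | generate_k_subset_rec_new_2
-- ===== SOURCE A (Python) =====
-- def generate_k_subset_rec_new_2(values, combinations):
--     def directed_subset(anchor, prefix):
--         if len(prefix) == combinations:
--             result.append(prefix.copy())
--             return
--
--         for i in range(anchor + 1, len(values)):
--             prefix.append(values[i])
--             directed_subset(i, prefix)
--             prefix.pop()
--
--     result = []
--     directed_subset(-1, [])
--     return result
-- ===== SOURCE B (Python) =====
-- def generate_k_subset_rec_new_2(values, combinations):
--     def comb(vals, k):
--         if k == 0: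
--             return [[]]
--         if k < 0 or not vals:
--             return []
--         rest = vals[1:]
--         return [[vals[0]] + c for c in comb(rest, k - 1)] + comb(rest, k)
--     return comb(values, combinations)
-- ===== Notes on version B (the rewrite author's own statement) =====
-- stated objective: simpler
-- what changed: Replaced the mutable shared-prefix backtracking (append/recurse/pop into a shared result list) by a pure include/exclude recursion that returns fresh combination lists and counts k down.
import Mathlib
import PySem

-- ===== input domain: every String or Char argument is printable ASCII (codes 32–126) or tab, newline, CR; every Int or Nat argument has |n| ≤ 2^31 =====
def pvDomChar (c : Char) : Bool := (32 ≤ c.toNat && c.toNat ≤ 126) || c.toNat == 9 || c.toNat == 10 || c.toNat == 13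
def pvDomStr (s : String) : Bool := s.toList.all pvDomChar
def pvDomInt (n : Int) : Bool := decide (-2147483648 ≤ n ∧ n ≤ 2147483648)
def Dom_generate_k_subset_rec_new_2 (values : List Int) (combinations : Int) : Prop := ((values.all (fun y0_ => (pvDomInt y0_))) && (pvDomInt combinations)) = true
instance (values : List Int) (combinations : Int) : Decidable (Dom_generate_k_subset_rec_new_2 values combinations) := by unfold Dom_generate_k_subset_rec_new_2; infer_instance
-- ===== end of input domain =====

-- B replaces A's mutable shared-prefix backtracking with a pure include/exclude recursion (simpler decomposition; same cost).

-- ===== PORT A =====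
-- A's inner `directed_subset(anchor, prefix)` scans i = anchor+1 .. len(values)-1; the suffix
-- values[anchor+1:] is carried as `rest`, and the for-loop (append values[i]; recurse with
-- anchor = i; pop; next i) is the structural recursion on that suffix: the i-th iteration
-- contributes dsubA with prefix++[x] on xs, followed by the remaining iterations dsubA pfx xs.
def dsubA (combinations : Int) (pfx : List Int) (rest : List Int) : List (List Int) :=
  if (pfx.length : Int) = combinations then [pfx]
  else
    match rest with
    | [] => []
    | x :: xs => dsubA combinations (pfx ++ [x]) xs ++ dsubA combinations pfx xs

def generate_k_subset_rec_new_2 (values : List Int) (combinations : Int) : List (List Int) :=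
  dsubA combinations [] values

-- ===== PORT B =====
def combB (vals : List Int) (k : Int) : List (List Int) :=
  if k = 0 then [[]]
  else if k < 0 then []
  else
    match vals with
    | [] => []
    | x :: xs => (combB xs (k - 1)).map (fun c => x :: c) ++ combB xs k

def generate_k_subset_rec_new_2_alt (values : List Int) (combinations : Int) : List (List Int) :=
  combB values combinations

-- ===== PRECONDITION & SPEC =====
def Spec_generate_k_subset_rec_new_2 (values : List Int) (combinations : Int) (out : List (List Int)) : Prop := out = generate_k_subset_rec_new_2_alt values combinations
instance (values : List Int) (combinations : Int) (out : List (List Int)) : Decidable (Spec_generate_k_subset_rec_new_2 values combinations out) := by unfold Spec_generate_k_subset_rec_new_2; infer_instance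

-- ===== CLAIM (what is proved, stated in full; the proofs are below) =====
def Claim_equal_generate_k_subset_rec_new_2 : Prop := ∀ (values : List Int) (combinations : Int), Dom_generate_k_subset_rec_new_2 values combinations → Spec_generate_k_subset_rec_new_2 values combinations (generate_k_subset_rec_new_2 values combinations)

-- ===== LEMMAS AND PROOFS =====

theorem combB_neg (vals : List Int) (k : Int) (h : k < 0) : combB vals k = [] := by
  have h0 : ¬ k = 0 := by omega
  cases vals <;> simp [combB, h0, h]

-- the include/exclude unfolding of combB on a cons, valid for every k ≠ 0
theorem combB_cons (x : Int) (xs : List Int) (k : Int) (h : k ≠ 0) :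
    combB (x :: xs) k = (combB xs (k - 1)).map (fun c => x :: c) ++ combB xs k := by
  by_cases hk : k < 0
  · rw [combB_neg _ _ hk, combB_neg _ _ (by omega), combB_neg _ _ hk]
    simp
  · simp [combB, h, hk]

theorem dsubA_eq (k : Int) (rest pfx : List Int) :
    dsubA k pfx rest = (combB rest (k - pfx.length)).map (fun c => pfx ++ c) := by
  induction rest generalizing pfx with
  | nil =>
    by_cases h : (pfx.length : Int) = k
    · have : k - (pfx.length : Int) = 0 := by omega
      simp [dsubA, h, this, combB]
    · have h0 : ¬ k - (pfx.length : Int) = 0 := by omega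
      by_cases hneg : k - (pfx.length : Int) < 0 <;> simp [dsubA, h, combB, h0, hneg]
  | cons x xs ih =>
    by_cases h : (pfx.length : Int) = k
    · have : k - (pfx.length : Int) = 0 := by omega
      simp [dsubA, h, this, combB]
    · have h0 : k - (pfx.length : Int) ≠ 0 := by omega
      rw [combB_cons _ _ _ h0]
      have hlen : k - ((pfx ++ [x]).length : Int) = k - (pfx.length : Int) - 1 := by
        simp; omega
      simp only [dsubA, h, if_false, ih (pfx ++ [x]), ih pfx, hlen]
      simp [List.map_map, Function.comp]

-- ===== VERDICT (by name: the statement is the Claim_ definition above) =====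
theorem generate_k_subset_rec_new_2_spec : Claim_equal_generate_k_subset_rec_new_2 := by
  intro values combinations _
  unfold Spec_generate_k_subset_rec_new_2 generate_k_subset_rec_new_2 generate_k_subset_rec_new_2_alt
  rw [dsubA_eq]
  simp
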